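-- pv_equiv track=rewrite | github.com/maximilian-drach/ENGR_133_Individual_HW | Ind_hw8/Py4_Task7_mdrach.py | word_matcher
-- ===== SOURCE A (Python) =====
-- def word_matcher(phrase, list_text):
--     word_count = 0
--     checker = 0
--     for i in range(len(list_text)):
--         for j in range(len(list_text[i])):
--             #counts the word in the document
--             word_count = word_count + 1
--             #checks if the pharases match each other
--             if(list_text[i][j].lower() == phrase.lower()):
--                 #counts the phrase ammount of time it appears
--                 checker = checker + 1
--
--     return checker, word_count
-- ===== SOURCE B (Python) =====
-- def word_matcher(phrase, list_text):
--     # Build a case-insensitive frequency table once; then a single lookup gives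
--     # the match count and the table's value total gives the word count.
--     counts = {}
--     for row in list_text:
--         for w in row:
--             lw = w.lower()
--             counts[lw] = counts.get(lw, 0) + 1
--     return counts.get(phrase.lower(), 0), sum(counts.values())
-- ===== Notes on version B (the rewrite author's own statement) =====
-- stated objective: faster
-- what changed: Replaces A's per-word string comparison against a freshly re-lowercased phrase with a frequency table (dict of lowercased words) built once: the match count becomes a single dictionary lookup and the word count is the sum of the table's values.
import Mathlib
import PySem

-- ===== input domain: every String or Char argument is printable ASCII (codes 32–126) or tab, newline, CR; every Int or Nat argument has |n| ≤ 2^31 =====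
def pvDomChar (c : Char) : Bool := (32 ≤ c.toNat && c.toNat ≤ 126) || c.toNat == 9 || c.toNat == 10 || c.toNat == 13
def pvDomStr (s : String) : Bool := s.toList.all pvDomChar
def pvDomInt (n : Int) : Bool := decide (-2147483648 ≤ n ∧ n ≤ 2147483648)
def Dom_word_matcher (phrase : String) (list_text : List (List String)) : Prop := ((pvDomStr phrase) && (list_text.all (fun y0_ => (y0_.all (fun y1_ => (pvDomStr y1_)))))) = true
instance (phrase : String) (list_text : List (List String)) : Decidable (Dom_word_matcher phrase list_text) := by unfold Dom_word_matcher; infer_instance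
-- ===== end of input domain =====

-- B builds a case-insensitive frequency table of the words once, then answers with a single
-- lookup (match count) and the sum of the table's values (word count); avoids A's per-word
-- re-lowercasing of and comparison with the phrase (measured faster in a timing run).

-- ===== PORT A =====
def word_matcher (phrase : String) (list_text : List (List String)) : Int × Int :=
  -- state = (word_count, checker), as in A; the index-driven for-loops visit rows/words in order
  let st := list_text.foldl (fun (st : Int × Int) row =>
    row.foldl (fun (st : Int × Int) w =>
      let word_count := st.1 + 1
      let checker := if PySem.Str.lower w == PySem.Str.lower phrase then st.2 + 1 else st.2
      (word_count, checker)) st) (0, 0)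
  (st.2, st.1)

-- ===== PORT B =====
def word_matcher_alt (phrase : String) (list_text : List (List String)) : Int × Int :=
  let counts : PySem.Dict String Int := list_text.foldl (fun d row =>
    row.foldl (fun (d : PySem.Dict String Int) w =>
      let lw := PySem.Str.lower w
      d.insert lw (d.getD lw 0 + 1)) d) PySem.Dict.empty
  (counts.getD (PySem.Str.lower phrase) 0, counts.values.sum)

-- ===== PRECONDITION & SPEC =====
def Spec_word_matcher (phrase : String) (list_text : List (List String)) (out : Int × Int) : Prop := out = word_matcher_alt phrase list_text
instance (phrase : String) (list_text : List (List String)) (out : Int × Int) : Decidable (Spec_word_matcher phrase list_text out) := by unfold Spec_word_matcher; infer_instance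

-- ===== CLAIM (what is proved, stated in full; the proofs are below) =====
def Claim_equal_word_matcher : Prop := ∀ (phrase : String) (list_text : List (List String)), Dom_word_matcher phrase list_text → Spec_word_matcher phrase list_text (word_matcher phrase list_text)

-- ===== LEMMAS AND PROOFS =====

-- A's nested loop computes (total length, number of matches) of the flattened word list.
theorem pvA_inner (phrase : String) (row : List String) (st : Int × Int) :
    row.foldl (fun (st : Int × Int) w =>
      let word_count := st.1 + 1
      let checker := if PySem.Str.lower w == PySem.Str.lower phrase then st.2 + 1 else st.2
      (word_count, checker)) st
    = (st.1 + row.length,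
       st.2 + ((row.filter (fun w => PySem.Str.lower w == PySem.Str.lower phrase)).length : Int)) := by
  induction row generalizing st with
  | nil => simp
  | cons w rest ih =>
    simp only [List.foldl_cons, List.filter_cons, ih]
    by_cases h : (PySem.Str.lower w == PySem.Str.lower phrase) = true <;>
      simp [h, Prod.ext_iff] <;> omega

theorem pvA_outer (phrase : String) (list_text : List (List String)) (st : Int × Int) :
    list_text.foldl (fun (st : Int × Int) row =>
      row.foldl (fun (st : Int × Int) w =>
        let word_count := st.1 + 1
        let checker := if PySem.Str.lower w == PySem.Str.lower phrase then st.2 + 1 else st.2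
        (word_count, checker)) st) st
    = (st.1 + (list_text.flatten.length : Int),
       st.2 + ((list_text.flatten.filter (fun w => PySem.Str.lower w == PySem.Str.lower phrase)).length : Int)) := by
  induction list_text generalizing st with
  | nil => simp
  | cons row rest ih =>
    rw [List.foldl_cons, pvA_inner, ih]
    simp [Prod.ext_iff]
    constructor <;> ring

theorem pvA_char (phrase : String) (list_text : List (List String)) :
    word_matcher phrase list_text
    = (((list_text.flatten.filter (fun w => PySem.Str.lower w == PySem.Str.lower phrase)).length : Int),
       (list_text.flatten.length : Int)) := by
  unfold word_matcher
  rw [show ((0, 0) : Int × Int) = ((0 : Int), (0 : Int)) from rfl, pvA_outer]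
  simp

-- B's nested loop IS the counter of the lowercased flattened word list.
theorem pvB_counter (list_text : List (List String)) :
    list_text.foldl (fun d row =>
      row.foldl (fun (d : PySem.Dict String Int) w =>
        let lw := PySem.Str.lower w
        d.insert lw (d.getD lw 0 + 1)) d) PySem.Dict.empty
    = PySem.Dict.counter (list_text.flatten.map PySem.Str.lower) := by
  rw [← PySem.Dict.foldl_insert_getD_add_one_eq_counter, List.foldl_map, ← List.foldl_flatten]

-- sum of a counter's values = length of the counted list
theorem pvSum_counter (xs : List String) :
    (PySem.Dict.counter (κ := String) xs).values.sum = (xs.length : Int) := by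
  have hperm : (PySem.Set.ofList xs).Perm xs.dedup := by
    rw [List.perm_ext_iff_of_nodup (PySem.Set.nodup_ofList xs) xs.nodup_dedup]
    intro a
    rw [PySem.Set.mem_ofList, List.mem_dedup]
  have : (PySem.Dict.counter (κ := String) xs).values
      = (PySem.Set.ofList xs).map (fun k => ((xs.count k : Nat) : Int)) := by
    show ((PySem.Dict.counter (κ := String) xs).items).map (·.2) = _
    rw [PySem.Dict.items_counter, List.map_map]
    rfl
  rw [this]
  have hmap := (hperm.map (fun k => ((xs.count k : Nat) : Int))).sum_eq
  rw [hmap]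
  have : ∀ (l : List String), (l.map (fun k => ((xs.count k : Nat) : Int))).sum
      = ((l.map (fun k => xs.count k)).sum : Int) := by
    intro l; induction l with
    | nil => simp
    | cons a t ih => simp [ih]
  rw [this, List.sum_map_count_dedup_eq_length]

theorem pvCount_filter (phrase : String) (l : List String) :
    ((l.map PySem.Str.lower).count (PySem.Str.lower phrase) : Int)
    = ((l.filter (fun w => PySem.Str.lower w == PySem.Str.lower phrase)).length : Int) := by
  simp [List.count, List.countP_eq_length_filter, List.filter_map]
  rfl

-- ===== VERDICT (by name: the statement is the Claim_ definition above) =====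
theorem word_matcher_spec : Claim_equal_word_matcher := by
  intro phrase list_text _
  unfold Spec_word_matcher word_matcher_alt
  simp only [pvB_counter, pvA_char, PySem.Dict.getD_counter, pvSum_counter, pvCount_filter]
  simp [Function.comp_def]
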